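-- pv_equiv track=rewrite | github.com/Jinting101/Leetcode_Solution | 3623-count-number-of-trapezoids-i/3623-count-number-of-trapezoids-i.py | countTrapezoids
-- ===== SOURCE A (Python) =====
-- from typing import List
--
-- def countTrapezoids(points: List[List[int]]) -> int:
--     dic = {}
--     for x,y in points:
--         dic[y] = dic.get(y, 0) + 1
--     groups = []
--     for x,cnt in dic.items():
--         if cnt > 1:
--             groups.append(cnt * (cnt-1) // 2)
--     res = 0
--     n, s = len(groups), sum(groups)
--     for i,x in enumerate(groups):
--         s -= x
--         if i != n-1:
--             res += x * s
--     return res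
-- ===== SOURCE B (Python) =====
-- def countTrapezoids(points):
--     cnt = {}
--     for x, y in points:
--         cnt[y] = cnt.get(y, 0) + 1
--     s = 0
--     q = 0
--     for c in cnt.values():
--         if c > 1:
--             g = c * (c - 1) // 2
--             s += g
--             q += g * g
--     # pairwise-product sum in closed form: sum_{i<j} g_i g_j = (S^2 - Q) / 2
--     return (s * s - q) // 2
-- ===== Notes on version B (the rewrite author's own statement) =====
-- stated objective: simpler
-- what changed: Replaces the groups list + enumerate suffix-sum scan with two running aggregates S and Q over the counter values and the algebraic identity sum_{i<j} g_i g_j = (S^2 - Q) // 2.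
import Mathlib
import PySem

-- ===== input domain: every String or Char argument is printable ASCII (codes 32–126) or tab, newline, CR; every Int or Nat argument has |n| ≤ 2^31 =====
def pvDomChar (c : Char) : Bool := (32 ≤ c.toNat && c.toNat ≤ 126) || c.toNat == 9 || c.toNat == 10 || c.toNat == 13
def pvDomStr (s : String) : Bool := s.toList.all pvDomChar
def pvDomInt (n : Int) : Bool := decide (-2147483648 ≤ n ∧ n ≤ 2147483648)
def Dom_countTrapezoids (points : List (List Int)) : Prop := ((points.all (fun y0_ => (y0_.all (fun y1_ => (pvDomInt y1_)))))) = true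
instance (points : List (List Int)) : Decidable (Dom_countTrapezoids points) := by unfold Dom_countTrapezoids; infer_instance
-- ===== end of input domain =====

-- B replaces A's groups list + enumerate suffix-sum scan by two aggregates S, Q and the identity sum_{i<j} g_i g_j = (S^2 - Q) // 2; equivalence proved on rows of length 2.

-- ===== PORT A =====
def countTrapezoids (points : List (List Int)) : Int :=
  -- dic[y] = dic.get(y, 0) + 1  (rows that are not pairs are excluded by Pre_)
  let dic : PySem.Dict Int Int := points.foldl (fun d p =>
    match p with
    | [_, y] => d.insert y (d.getD y 0 + 1)
    | _ => d) PySem.Dict.empty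
  -- groups.append(cnt * (cnt-1) // 2) if cnt > 1
  let groups : List Int := dic.items.foldl (fun acc kc =>
    if kc.2 > 1 then acc ++ [PySem.Int.floordiv (kc.2 * (kc.2 - 1)) 2] else acc) []
  let n : Int := groups.length
  let rs := (PySem.List.enumerate groups 0).foldl (fun (rs : Int × Int) (ix : Int × Int) =>
    ((if ix.1 ≠ n - 1 then rs.1 + ix.2 * (rs.2 - ix.2) else rs.1), rs.2 - ix.2))
    (0, groups.sum)
  rs.1

-- ===== PORT B =====
def countTrapezoids_alt (points : List (List Int)) : Int :=
  -- 'x, y = p': rows other than pairs are excluded by Pre_; y = p[1]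
  let cnt : PySem.Dict Int Int := points.foldl (fun d p =>
    if p.length == 2 then d.insert (p.getD 1 0) (d.getD (p.getD 1 0) 0 + 1) else d)
    PySem.Dict.empty
  let sq := cnt.values.foldl (fun (sq : Int × Int) c =>
    if c > 1 then
      (sq.1 + PySem.Int.floordiv (c * (c - 1)) 2,
       sq.2 + PySem.Int.floordiv (c * (c - 1)) 2 * PySem.Int.floordiv (c * (c - 1)) 2)
    else sq) (0, 0)
  PySem.Int.floordiv (sq.1 * sq.1 - sq.2) 2

-- ===== PRECONDITION & SPEC =====
-- Pre_: A raises ValueError unpacking 'for x,y in points' unless every row has exactly 2 entries.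
def Pre_countTrapezoids (points : List (List Int)) : Prop := ∀ p ∈ points, p.length = 2
instance (points : List (List Int)) : Decidable (Pre_countTrapezoids points) := by unfold Pre_countTrapezoids; infer_instance
def pvWitness_countTrapezoids : List (List Int) := [[0, 1], [2, 1], [3, 4]]

def Spec_countTrapezoids (points : List (List Int)) (out : Int) : Prop := out = countTrapezoids_alt points
instance (points : List (List Int)) (out : Int) : Decidable (Spec_countTrapezoids points out) := by unfold Spec_countTrapezoids; infer_instance

-- ===== CLAIM (what is proved, stated in full; the proofs are below) =====
def Claim_equal_countTrapezoids : Prop := ∀ (points : List (List Int)), Dom_countTrapezoids points → Pre_countTrapezoids points → Spec_countTrapezoids points (countTrapezoids points)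

-- ===== LEMMAS AND PROOFS =====

-- sum of pairwise products sum_{i<j} g_i g_j
def pairSum : List Int → Int
  | [] => 0
  | g :: t => g * t.sum + pairSum t

-- A's enumerate loop computes pairSum (the 'i != n-1' guard only skips a zero contribution)
lemma loopA_eq (n : Int) (gs : List Int) : ∀ (k r : Int), k + gs.length ≤ n →
    ((PySem.List.enumerate gs k).foldl (fun (rs : Int × Int) (ix : Int × Int) =>
      ((if ix.1 ≠ n - 1 then rs.1 + ix.2 * (rs.2 - ix.2) else rs.1), rs.2 - ix.2))
      (r, gs.sum)).1 = r + pairSum gs := by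
  induction gs with
  | nil => intro k r _; simp [PySem.List.enumerate_nil, pairSum]
  | cons g t ih =>
    intro k r hk
    rw [PySem.List.enumerate_cons]
    simp only [List.foldl_cons, List.sum_cons]
    have hs : g + t.sum - g = t.sum := by ring
    simp only [List.length_cons] at hk
    push_cast at hk
    by_cases h : k ≠ n - 1
    · rw [if_pos h, hs, ih (k + 1) (r + g * t.sum) (by omega)]
      simp [pairSum]; ring
    · push Not at h
      have ht : t = [] := List.length_eq_zero_iff.mp (by omega)
      subst ht
      simp [PySem.List.enumerate_nil, pairSum, h]

lemma two_pairSum (gs : List Int) :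
    2 * pairSum gs = gs.sum * gs.sum - (gs.map (fun g => g * g)).sum := by
  induction gs with
  | nil => simp [pairSum]
  | cons g t ih =>
    simp only [pairSum, List.sum_cons, List.map_cons]
    linear_combination ih

lemma floordiv_two_mul (p : Int) : PySem.Int.floordiv (2 * p) 2 = p := by
  rw [PySem.Int.floordiv_eq_ediv_of_pos (by norm_num)]
  omega

-- the shared closed-form value over a list of group sizes
lemma closed_form (gs : List Int) :
    pairSum gs = PySem.Int.floordiv (gs.sum * gs.sum - (gs.map (fun g => g * g)).sum) 2 := by
  rw [← two_pairSum, floordiv_two_mul]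

theorem countTrapezoids_spec : Claim_equal_countTrapezoids := by
  intro points _ hpre
  unfold Spec_countTrapezoids countTrapezoids countTrapezoids_alt
  simp only []
  have hdd : points.foldl (fun (d : PySem.Dict Int Int) p =>
      if p.length == 2 then d.insert (p.getD 1 0) (d.getD (p.getD 1 0) 0 + 1) else d)
      PySem.Dict.empty
    = points.foldl (fun (d : PySem.Dict Int Int) p =>
      match p with
      | [_, y] => d.insert y (d.getD y 0 + 1)
      | _ => d) PySem.Dict.empty := by
    apply PySem.List.foldl_congr_mem
    intro acc x hx
    have h2 := hpre x hx
    match x, h2 with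
    | [a, b], _ => simp
  rw [hdd]
  set d : PySem.Dict Int Int := points.foldl (fun d p =>
    match p with
    | [_, y] => d.insert y (d.getD y 0 + 1)
    | _ => d) PySem.Dict.empty with hd
  -- A's groups list
  rw [PySem.List.foldl_append_ite (p := fun kc : Int × Int => kc.2 > 1)
       (f := fun kc : Int × Int => PySem.Int.floordiv (kc.2 * (kc.2 - 1)) 2)]
  rw [PySem.List.foldl_ite_eq_foldl_filter (p := fun c : Int => c > 1)]
  rw [PySem.List.foldl_prod_mk
        (f := fun a (c : Int) => a + PySem.Int.floordiv (c * (c - 1)) 2)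
        (g := fun a (c : Int) => a + PySem.Int.floordiv (c * (c - 1)) 2 * PySem.Int.floordiv (c * (c - 1)) 2)]
  rw [PySem.List.foldl_add (g := fun c : Int => PySem.Int.floordiv (c * (c - 1)) 2),
      PySem.List.foldl_add (g := fun c : Int => PySem.Int.floordiv (c * (c - 1)) 2 * PySem.Int.floordiv (c * (c - 1)) 2)]
  -- identify the two group lists
  set gs : List Int := (d.items.filter (fun kc => decide (kc.2 > 1))).map
      (fun kc => PySem.Int.floordiv (kc.2 * (kc.2 - 1)) 2) with hgs
  have hv : (d.values.filter (fun c => decide (c > 1))).map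
      (fun c => PySem.Int.floordiv (c * (c - 1)) 2) = gs := by
    simp only [PySem.Dict.values, hgs, List.filter_map, List.map_map]
    rfl
  have hv2 : (d.values.filter (fun c => decide (c > 1))).map
      (fun c => PySem.Int.floordiv (c * (c - 1)) 2 * PySem.Int.floordiv (c * (c - 1)) 2)
      = gs.map (fun g => g * g) := by
    rw [← hv, List.map_map]
    rfl
  rw [hv, hv2]
  simp only [List.nil_append]
  refine (loopA_eq (gs.length : Int) gs 0 0 (by omega)).trans ?_
  simp only [zero_add]
  rw [closed_form]

-- ===== VERDICT (by name: the statement is the Claim_ definition above) =====
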